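-- pv_equiv track=rewrite | github.com/mirceadino/public-key-criptography | lab5/app.py | is_good_alphabet
-- ===== SOURCE A (Python) =====
-- def contains_only_characters_from(text, alphabet):
--     for x in text:
--         if x not in alphabet:
--             return False
--     return True
--
-- def is_good_alphabet(alphabet):
--     d = {}
--     for x in alphabet:
--         if x not in d:
--             d[x] = 0
--         d[x] += 1
--     for x in d.values():
--         if x > 1:
--             return False
--     basic_alphabet = "_abcdefghijklmnopqrstuvwxyz"
--     return contains_only_characters_from(alphabet, basic_alphabet)
-- ===== SOURCE B (Python) =====
-- def is_good_alphabet(alphabet):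
--     total = 0
--     for c in "_abcdefghijklmnopqrstuvwxyz":
--         k = sum(1 for x in alphabet if x == c)
--         if k > 1:
--             return False
--         total += k
--     return total == len(alphabet)
-- ===== Notes on version B (the rewrite author's own statement) =====
-- stated objective: alternative
-- what changed: Instead of building a per-character count dict over the input and then scanning its values plus a separate membership pass, B iterates over the fixed 27-character basic alphabet, counting each basic character's occurrences in the input (early False on a count > 1) and finally comparing the accumulated total with len(alphabet), which simultaneously detects characters outside the basic alphabet.
import Mathlib
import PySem

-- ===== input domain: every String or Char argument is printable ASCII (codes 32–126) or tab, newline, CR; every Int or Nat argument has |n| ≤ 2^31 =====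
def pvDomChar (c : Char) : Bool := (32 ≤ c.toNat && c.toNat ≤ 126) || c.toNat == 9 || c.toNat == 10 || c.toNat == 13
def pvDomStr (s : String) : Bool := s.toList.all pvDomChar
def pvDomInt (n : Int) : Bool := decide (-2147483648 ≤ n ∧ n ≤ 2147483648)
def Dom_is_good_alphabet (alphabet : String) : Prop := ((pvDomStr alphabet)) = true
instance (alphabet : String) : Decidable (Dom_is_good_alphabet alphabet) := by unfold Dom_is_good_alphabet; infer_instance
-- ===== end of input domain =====

-- B replaces A's count-dict over the input plus a values pass and a membership pass by one
-- loop over the fixed basic alphabet that counts each basic character in the input and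
-- compares the total with the input's length (objective: alternative decomposition).


-- ===== PORT A =====
-- helper: for x in text: if x not in alphabet: return False / return True
def contains_only_characters_from (text alphabet : List Char) : Bool :=
  match text with
  | [] => true
  | x :: rest => if x ∈ alphabet then contains_only_characters_from rest alphabet else false

def is_good_alphabet (alphabet : String) : Bool :=
  -- d = {}; for x in alphabet: if x not in d: d[x] = 0; d[x] += 1
  let d : PySem.Dict Char Int := alphabet.toList.foldl
    (fun d x =>
      let d := if d.contains x then d else d.insert x 0
      d.modify x 0 (· + 1))
    PySem.Dict.empty
  -- for x in d.values(): if x > 1: return False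
  if d.values.any (fun v => v > 1) then false
  else contains_only_characters_from alphabet.toList "_abcdefghijklmnopqrstuvwxyz".toList

-- ===== PORT B =====
-- for c in basic: k = sum(1 for x in alphabet if x == c); if k > 1: return False; total += k
-- then: return total == len(alphabet)
def isGoodAltLoop (alphabet : List Char) : List Char → Int → Bool
  | [], total => total == (alphabet.length : Int)
  | c :: rest, total =>
    let k : Int := alphabet.foldl (fun acc x => if x == c then acc + 1 else acc) 0
    if k > 1 then false
    else isGoodAltLoop alphabet rest (total + k)

def is_good_alphabet_alt (alphabet : String) : Bool :=
  isGoodAltLoop alphabet.toList "_abcdefghijklmnopqrstuvwxyz".toList 0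

-- ===== PRECONDITION & SPEC =====
def Spec_is_good_alphabet (alphabet : String) (out : Bool) : Prop := out = is_good_alphabet_alt alphabet
instance (alphabet : String) (out : Bool) : Decidable (Spec_is_good_alphabet alphabet out) := by unfold Spec_is_good_alphabet; infer_instance

-- ===== CLAIM (what is proved, stated in full; the proofs are below) =====
def Claim_equal_is_good_alphabet : Prop := ∀ (alphabet : String), Dom_is_good_alphabet alphabet → Spec_is_good_alphabet alphabet (is_good_alphabet alphabet)

-- ===== LEMMAS AND PROOFS =====

-- A's loop body (setdefault-then-increment) is exactly Counter's step.
theorem pv_step_eq (d : PySem.Dict Char Int) (x : Char) :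
    (if d.contains x then d else d.insert x 0).modify x 0 (· + 1) = d.modify x 0 (· + 1) := by
  by_cases h : d.contains x = true
  · simp [h]
  · rw [Bool.not_eq_true] at h
    have hg := PySem.Dict.getD_of_not_contains (d := d) (k := x) (d0 := (0:Int)) h
    simp [h, PySem.Dict.modify, PySem.Dict.insert_insert_self, hg]

-- A's second pass over the counter's values is exactly "some duplicate exists".
theorem pv_values_any (l : List Char) :
    ((PySem.Dict.counter l).values.any (fun v => v > 1)) = !decide l.Nodup := by
  rw [PySem.Dict.values_eq_map_keys _ (PySem.Dict.nodup_keys_counter l) 0]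
  rw [PySem.Dict.keys_counter]
  simp only [List.any_map]
  rcases Bool.eq_false_or_eq_true (decide l.Nodup) with hn | hn
  · rw [hn]
    rw [decide_eq_true_iff, List.nodup_iff_count_le_one] at hn
    simp only [Bool.not_true, List.any_eq_false]
    intro a _
    simp only [Function.comp_apply, PySem.Dict.getD_counter, decide_eq_true_eq, not_lt]
    exact_mod_cast hn a
  · rw [hn]
    rw [decide_eq_false_iff_not, List.nodup_iff_count_le_one] at hn
    push Not at hn
    obtain ⟨a, ha⟩ := hn
    have hmem : a ∈ PySem.Set.ofList l := by
      rw [PySem.Set.mem_ofList]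
      exact List.count_pos_iff.mp (by omega)
    simp only [Bool.not_false, List.any_eq_true]
    refine ⟨a, hmem, ?_⟩
    simp only [Function.comp_apply, PySem.Dict.getD_counter, decide_eq_true_eq]
    exact_mod_cast ha

-- A's helper is an all() membership scan.
theorem pv_contains_only (text alphabet : List Char) :
    contains_only_characters_from text alphabet = text.all (fun c => c ∈ alphabet) := by
  induction text with
  | nil => rfl
  | cons x rest ih =>
    rw [contains_only_characters_from, List.all_cons, ih]
    by_cases h : x ∈ alphabet <;> simp [h]

-- B's loop: all counts so far ≤ 1 and the running total accounts for every remaining count.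
theorem pv_alt_loop_iff (l : List Char) (rest : List Char) (total : Int) :
    isGoodAltLoop l rest total = true ↔
      ((∀ c ∈ rest, l.count c ≤ 1) ∧
        total + (rest.map (fun c => (l.count c : Int))).sum = (l.length : Int)) := by
  induction rest generalizing total with
  | nil => simp [isGoodAltLoop]
  | cons c rest ih =>
    rw [isGoodAltLoop]
    rw [PySem.List.foldl_beq_add_one]
    by_cases hk : (0 : Int) + (l.count c : Int) > 1
    · simp only [if_pos hk]
      constructor
      · intro h; exact absurd h (by simp)
      · rintro ⟨h1, -⟩
        have := h1 c (List.mem_cons_self)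
        omega
    · simp only [if_neg hk, ih]
      constructor
      · rintro ⟨h1, h2⟩
        refine ⟨?_, ?_⟩
        · intro a ha
          rcases List.mem_cons.mp ha with rfl | ha
          · omega
          · exact h1 a ha
        · simp only [List.map_cons, List.sum_cons]; omega
      · rintro ⟨h1, h2⟩
        refine ⟨fun a ha => h1 a (List.mem_cons_of_mem _ ha), ?_⟩
        simp only [List.map_cons, List.sum_cons] at h2; omega

-- Adding one character to the input raises the count-sum by that character's multiplicity in rest.
theorem pv_count_cons_sum (rest l : List Char) (x : Char) :
    (rest.map (fun c => (((x :: l).count c : Int)))).sum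
      = (rest.map (fun c => (l.count c : Int))).sum + (rest.count x : Int) := by
  induction rest with
  | nil => simp
  | cons r rs ih =>
    simp only [List.map_cons, List.sum_cons]
    rw [ih, List.count_cons, List.count_cons]
    by_cases h : r = x
    · subst h; simp; ring
    · have h' : x ≠ r := fun he => h he.symm
      simp only [beq_iff_eq, if_neg h, if_neg h']
      push_cast; ring

-- Summing each basic character's count over the input counts the input's basic characters.
theorem pv_sum_counts (rest : List Char) (hnd : rest.Nodup) (l : List Char) :
    (rest.map (fun c => (l.count c : Int))).sum = ((l.filter (fun x => x ∈ rest)).length : Int) := by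
  induction l with
  | nil => simp
  | cons x l ih =>
    rw [pv_count_cons_sum, ih]
    by_cases hx : x ∈ rest
    · have h1 : rest.count x = 1 := List.count_eq_one_of_mem hnd hx
      simp [hx, h1]
    · have h0 : rest.count x = 0 := List.count_eq_zero.mpr hx
      simp [hx, h0]

-- ===== VERDICT (by name: the statement is the Claim_ definition above) =====
theorem is_good_alphabet_spec : Claim_equal_is_good_alphabet := by
  intro alphabet _
  unfold Spec_is_good_alphabet is_good_alphabet is_good_alphabet_alt
  set l := alphabet.toList with hl
  set basic := "_abcdefghijklmnopqrstuvwxyz".toList with hb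
  have hfold : (fun (d : PySem.Dict Char Int) x =>
      (if d.contains x then d else d.insert x 0).modify x 0 (· + 1))
      = fun (d : PySem.Dict Char Int) x => d.modify x 0 (· + 1) := by
    funext d x; exact pv_step_eq d x
  simp only [hfold]
  rw [show l.foldl (fun (d : PySem.Dict Char Int) x => d.modify x 0 (· + 1))
        PySem.Dict.empty = PySem.Dict.counter l from rfl]
  rw [pv_values_any, pv_contains_only]
  have hbnd : basic.Nodup := by rw [hb]; decide
  -- characterize B as: every basic char appears at most once, and all chars are basic
  have hB : isGoodAltLoop l basic 0 = true ↔
      ((∀ c ∈ basic, l.count c ≤ 1) ∧ (∀ x ∈ l, x ∈ basic)) := by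
    rw [pv_alt_loop_iff, pv_sum_counts basic hbnd l]
    constructor
    · rintro ⟨h1, h2⟩
      refine ⟨h1, ?_⟩
      have hlen : (l.filter (fun x => x ∈ basic)).length = l.length := by omega
      have := (List.length_filter_eq_length_iff).mp hlen
      intro x hx; simpa using this x hx
    · rintro ⟨h1, h2⟩
      refine ⟨h1, ?_⟩
      have hlen : (l.filter (fun x => x ∈ basic)).length = l.length :=
        (List.length_filter_eq_length_iff).mpr (by intro x hx; simpa using h2 x hx)
      omega
  -- characterize A the same way
  rcases Bool.eq_false_or_eq_true (isGoodAltLoop l basic 0) with hA | hA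
  · rw [hA]
    obtain ⟨h1, h2⟩ := hB.mp hA
    have hnd : l.Nodup := by
      rw [List.nodup_iff_count_le_one]
      intro a
      by_cases ha : a ∈ l
      · exact h1 a (h2 a ha)
      · simp [List.count_eq_zero.mpr ha]
    have : l.all (fun c => c ∈ basic) = true := by
      rw [List.all_eq_true]; intro x hx; simpa using h2 x hx
    simp [hnd, this]
  · rw [hA]
    have hBn : ¬ ((∀ c ∈ basic, l.count c ≤ 1) ∧ (∀ x ∈ l, x ∈ basic)) := by
      intro h; exact absurd (hA.symm.trans (hB.mpr h)) (by decide)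
    by_cases hnd : l.Nodup
    · -- then some char of l is outside basic
      have hall : ¬ (∀ x ∈ l, x ∈ basic) := by
        intro h; exact hBn ⟨fun c _ => (List.nodup_iff_count_le_one.mp hnd c), h⟩
      have : l.all (fun c => c ∈ basic) = false := by
        rw [List.all_eq_false]
        push Not at hall
        obtain ⟨x, hx1, hx2⟩ := hall
        exact ⟨x, hx1, by simpa using hx2⟩
      simp [hnd, this]
    · simp [hnd]
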